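-- pv_equiv track=rewrite | github.com/MrBrantCode/unitest_baseline | mut_generate/mist_train_cf/cf_93182/solution.py | check_sum_divisible_by_10
-- ===== SOURCE A (Python) =====
-- def check_sum_divisible_by_10(nums):
--     remainder_set = set()
--
--     for num in nums:
--         remainder = num % 10
--         complement = (10 - remainder) % 10
--
--         if complement in remainder_set:
--             return True
--
--         remainder_set.add(remainder)
--
--     return False
-- ===== SOURCE B (Python) =====
-- def check_sum_divisible_by_10(nums):
--     counts = {}
--     for num in nums:
--         r = num % 10
--         counts[r] = counts.get(r, 0) + 1
--     for r in counts:
--         c = (10 - r) % 10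
--         if (c == r and counts[r] >= 2) or (c != r and c in counts):
--             return True
--     return False
-- ===== Notes on version B (the rewrite author's own statement) =====
-- stated objective: alternative
-- what changed: Replaces A's single pass with an incrementally grown complement set by a two-phase tally-then-check: build a remainder counter in one pass, then scan the distinct remainders, detecting a pair as (complement == r and count >= 2) or (complement != r and complement present).
import Mathlib
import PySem

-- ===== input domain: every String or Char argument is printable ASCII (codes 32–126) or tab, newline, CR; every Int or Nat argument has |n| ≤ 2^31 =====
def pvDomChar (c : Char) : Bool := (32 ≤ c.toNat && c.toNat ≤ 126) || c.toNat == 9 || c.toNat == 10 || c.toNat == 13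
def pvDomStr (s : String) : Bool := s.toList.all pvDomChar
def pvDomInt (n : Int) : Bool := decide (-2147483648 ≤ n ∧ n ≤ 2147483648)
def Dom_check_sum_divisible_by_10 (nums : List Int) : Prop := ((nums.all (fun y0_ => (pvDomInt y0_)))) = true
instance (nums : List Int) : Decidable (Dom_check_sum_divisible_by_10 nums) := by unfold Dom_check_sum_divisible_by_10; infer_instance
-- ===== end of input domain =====

-- B replaces A's single pass over nums with a growing complement set by a two-phase
-- tally-then-check over a remainder counter; same result, same O(n) cost (objective: alternative).


-- ===== PORT A =====
-- the 'for num in nums' loop with the growing remainder_set and early 'return True'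
def pvALoop : List Int → PySem.Set Int → Bool
  | [], _ => false
  | num :: rest, s =>
    let remainder := PySem.Int.mod num 10
    let complement := PySem.Int.mod (10 - remainder) 10
    if PySem.Set.contains s complement then true
    else pvALoop rest (PySem.Set.add s remainder)

def check_sum_divisible_by_10 (nums : List Int) : Bool :=
  pvALoop nums PySem.Set.empty

-- ===== PORT B =====
-- first pass of Source B: counts[r] = counts.get(r, 0) + 1 over the remainders
def pvBCounts (nums : List Int) : PySem.Dict Int Int :=
  nums.foldl (fun d num =>
    let r := PySem.Int.mod num 10
    d.insert r (d.getD r 0 + 1)) PySem.Dict.empty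

-- second pass of Source B: 'for r in counts: … return True' is an any over the keys
def check_sum_divisible_by_10_alt (nums : List Int) : Bool :=
  let counts := pvBCounts nums
  counts.keys.any (fun r =>
    let c := PySem.Int.mod (10 - r) 10
    (c == r && decide (2 ≤ counts.getD r 0)) || (c != r && counts.contains c))

-- ===== PRECONDITION & SPEC =====
def Spec_check_sum_divisible_by_10 (nums : List Int) (out : Bool) : Prop := out = check_sum_divisible_by_10_alt nums
instance (nums : List Int) (out : Bool) : Decidable (Spec_check_sum_divisible_by_10 nums out) := by unfold Spec_check_sum_divisible_by_10; infer_instance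

-- ===== CLAIM (what is proved, stated in full; the proofs are below) =====
def Claim_equal_check_sum_divisible_by_10 : Prop := ∀ (nums : List Int), Dom_check_sum_divisible_by_10 nums → Spec_check_sum_divisible_by_10 nums (check_sum_divisible_by_10 nums)

-- ===== LEMMAS AND PROOFS =====

-- proof-side shorthand for the complement of a remainder
def pvComp (r : Int) : Int := PySem.Int.mod (10 - r) 10

-- proof-side characterisation: some element's complement equals a later element
def pvHasPairR : List Int → Bool
  | [] => false
  | r :: rest => rest.any (fun m => pvComp r == m) || pvHasPairR rest

theorem pvComp_sym (n m : Int) :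
    pvComp (PySem.Int.mod m 10) = PySem.Int.mod n 10 ↔
    pvComp (PySem.Int.mod n 10) = PySem.Int.mod m 10 := by
  simp only [pvComp, PySem.Int.mod_eq_emod_of_pos (show (0:Int) < 10 by norm_num)]
  omega

theorem pvComp_invol {a b : Int} (h0 : 0 ≤ a) (h1 : a < 10) (hc : pvComp a = b)
    (_hab : a ≠ b) : pvComp b = a := by
  simp only [pvComp, PySem.Int.mod_eq_emod_of_pos (show (0:Int) < 10 by norm_num)] at hc ⊢
  omega

theorem pvSet_contains_iff (s : PySem.Set Int) (x : Int) :
    PySem.Set.contains s x = true ↔ x ∈ s := by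
  simp [PySem.Set.contains]

theorem pvALoop_iff (nums : List Int) (s : PySem.Set Int) :
    pvALoop nums s = true ↔
      pvHasPairR (nums.map (fun n => PySem.Int.mod n 10)) = true ∨
      ∃ n ∈ nums, pvComp (PySem.Int.mod n 10) ∈ s := by
  induction nums generalizing s with
  | nil => simp [pvALoop, pvHasPairR]
  | cons n rest ih =>
    show (if PySem.Set.contains s (PySem.Int.mod (10 - PySem.Int.mod n 10) 10) then true
          else pvALoop rest (PySem.Set.add s (PySem.Int.mod n 10))) = true ↔ _
    by_cases h : pvComp (PySem.Int.mod n 10) ∈ s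
    · simp only [pvComp] at h
      rw [if_pos ((pvSet_contains_iff _ _).mpr h)]
      simp only [pvComp]
      constructor
      · intro _; right; exact ⟨n, List.mem_cons_self, h⟩
      · intro _; trivial
    · have hc : ¬ PySem.Set.contains s (PySem.Int.mod (10 - PySem.Int.mod n 10) 10) = true :=
        fun hh => h ((pvSet_contains_iff _ _).mp hh)
      rw [if_neg hc]
      rw [ih]
      simp only [List.map_cons, pvHasPairR, Bool.or_eq_true, List.any_eq_true,
        List.mem_map, List.mem_cons, beq_iff_eq]
      constructor
      · rintro (hp | ⟨m, hm, hms⟩)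
        · exact Or.inl (Or.inr hp)
        · rcases (PySem.Set.mem_add s _ _).mp hms with hin | heq
          · exact Or.inr ⟨m, Or.inr hm, hin⟩
          · exact Or.inl (Or.inl ⟨PySem.Int.mod m 10, ⟨m, hm, rfl⟩,
              (pvComp_sym n m).mp heq⟩)
      · rintro ((⟨r, ⟨m, hm, rfl⟩, hr⟩ | hp) | ⟨m, (rfl | hm), hms⟩)
        · exact Or.inr ⟨m, hm, (PySem.Set.mem_add s _ _).mpr
            (Or.inr ((pvComp_sym n m).mpr hr))⟩
        · exact Or.inl hp
        · exact absurd hms h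
        · exact Or.inr ⟨m, hm, (PySem.Set.mem_add s _ _).mpr (Or.inl hms)⟩

theorem pvBCounts_eq (nums : List Int) :
    pvBCounts nums = PySem.Dict.counter (nums.map (fun n => PySem.Int.mod n 10)) := by
  rw [← PySem.Dict.foldl_insert_getD_add_one_eq_counter, List.foldl_map]
  rfl

theorem pvAlt_iff (nums : List Int) :
    check_sum_divisible_by_10_alt nums = true ↔
      ∃ r ∈ nums.map (fun n => PySem.Int.mod n 10),
        (pvComp r = r ∧ 2 ≤ (nums.map (fun n => PySem.Int.mod n 10)).count r) ∨
        (pvComp r ≠ r ∧ pvComp r ∈ nums.map (fun n => PySem.Int.mod n 10)) := by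
  unfold check_sum_divisible_by_10_alt
  rw [pvBCounts_eq]
  simp only [PySem.Dict.keys_counter, List.any_eq_true, PySem.Dict.getD_counter,
    PySem.Dict.contains_counter, PySem.Set.mem_ofList, Bool.or_eq_true, Bool.and_eq_true,
    beq_iff_eq, bne_iff_ne, decide_eq_true_eq, List.contains_iff_mem, pvComp]
  constructor
  · rintro ⟨r, hr, (⟨hcr, hcount⟩ | ⟨hne, hmem⟩)⟩
    · exact ⟨r, hr, Or.inl ⟨hcr, by exact_mod_cast hcount⟩⟩
    · exact ⟨r, hr, Or.inr ⟨hne, hmem⟩⟩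
  · rintro ⟨r, hr, (⟨hcr, hcount⟩ | ⟨hne, hmem⟩)⟩
    · exact ⟨r, hr, Or.inl ⟨hcr, by exact_mod_cast hcount⟩⟩
    · exact ⟨r, hr, Or.inr ⟨hne, hmem⟩⟩

theorem pvPair_of_count {l : List Int} {a : Int} (hc : pvComp a = a) (h2 : 2 ≤ l.count a) :
    pvHasPairR l = true := by
  induction l with
  | nil => simp at h2
  | cons x rest ih =>
    by_cases hx : a = x
    · subst hx
      have : 1 ≤ rest.count a := by
        rw [List.count_cons_self] at h2; omega
      have ha : a ∈ rest := List.count_pos_iff.mp (by omega)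
      simp only [pvHasPairR, Bool.or_eq_true, List.any_eq_true, beq_iff_eq]
      exact Or.inl ⟨a, ha, hc⟩
    · have h2' : 2 ≤ rest.count a := by
        rw [List.count_cons_of_ne (fun hh => hx hh.symm)] at h2; exact h2
      simp only [pvHasPairR, Bool.or_eq_true]
      exact Or.inr (ih h2')

theorem pvPair_of_two {l : List Int} {a b : Int} (hbnd : ∀ x ∈ l, 0 ≤ x ∧ x < 10)
    (ha : a ∈ l) (hb : b ∈ l) (hab : a ≠ b) (hc : pvComp a = b) :
    pvHasPairR l = true := by
  induction l with
  | nil => simp at ha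
  | cons x rest ih =>
    simp only [pvHasPairR, Bool.or_eq_true, List.any_eq_true, beq_iff_eq]
    by_cases hxa : x = a
    · subst hxa
      have hbr : b ∈ rest := by
        rcases List.mem_cons.mp hb with h | h
        · exact absurd h.symm hab
        · exact h
      exact Or.inl ⟨b, hbr, hc⟩
    · by_cases hxb : x = b
      · subst hxb
        have har : a ∈ rest := by
          rcases List.mem_cons.mp ha with h | h
          · exact absurd h (fun hh => hxa hh.symm)
          · exact h
        have hbnda := hbnd a ha
        exact Or.inl ⟨a, har, pvComp_invol hbnda.1 hbnda.2 hc hab⟩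
      · have har : a ∈ rest := by
          rcases List.mem_cons.mp ha with h | h
          · exact absurd h (fun hh => hxa hh.symm)
          · exact h
        have hbr : b ∈ rest := by
          rcases List.mem_cons.mp hb with h | h
          · exact absurd h (fun hh => hxb hh.symm)
          · exact h
        exact Or.inr (ih (fun y hy => hbnd y (List.mem_cons_of_mem x hy)) har hbr)

theorem pvMid (l : List Int) (hbnd : ∀ x ∈ l, 0 ≤ x ∧ x < 10) :
    pvHasPairR l = true ↔
      ∃ r ∈ l, (pvComp r = r ∧ 2 ≤ l.count r) ∨ (pvComp r ≠ r ∧ pvComp r ∈ l) := by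
  constructor
  · intro h
    induction l with
    | nil => simp [pvHasPairR] at h
    | cons x rest ih =>
      simp only [pvHasPairR, Bool.or_eq_true, List.any_eq_true, beq_iff_eq] at h
      rcases h with ⟨m, hm, hcm⟩ | hp
      · by_cases hxm : pvComp x = x
        · refine ⟨x, List.mem_cons_self, Or.inl ⟨hxm, ?_⟩⟩
          have : m = x := by rw [← hcm, hxm]
          subst this
          have : 1 ≤ rest.count m := List.count_pos_iff.mpr hm
          rw [List.count_cons_self]; omega
        · refine ⟨x, List.mem_cons_self, Or.inr ⟨hxm, ?_⟩⟩
          rw [hcm]; exact List.mem_cons_of_mem x hm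
      · rcases ih (fun y hy => hbnd y (List.mem_cons_of_mem x hy)) hp with
          ⟨r, hr, ⟨hcr, hcnt⟩ | ⟨hne, hmem⟩⟩
        · refine ⟨r, List.mem_cons_of_mem x hr, Or.inl ⟨hcr, ?_⟩⟩
          by_cases hxr : r = x
          · rw [hxr, List.count_cons_self]; rw [hxr] at hcnt; omega
          · rw [List.count_cons_of_ne (fun hh => hxr hh.symm)]; exact hcnt
        · exact ⟨r, List.mem_cons_of_mem x hr,
            Or.inr ⟨hne, List.mem_cons_of_mem x hmem⟩⟩
  · rintro ⟨r, hr, ⟨hcr, hcnt⟩ | ⟨hne, hmem⟩⟩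
    · exact pvPair_of_count hcr hcnt
    · exact pvPair_of_two hbnd hr hmem (Ne.symm hne) rfl

-- ===== VERDICT (by name: the statement is the Claim_ definition above) =====
theorem check_sum_divisible_by_10_spec : Claim_equal_check_sum_divisible_by_10 := by
  intro nums _hdom
  unfold Spec_check_sum_divisible_by_10
  rw [Bool.eq_iff_iff]
  have hbnd : ∀ x ∈ nums.map (fun n => PySem.Int.mod n 10), 0 ≤ x ∧ x < 10 := by
    intro x hx
    rcases List.mem_map.mp hx with ⟨n, _, rfl⟩
    exact ⟨PySem.Int.mod_nonneg n (by norm_num), PySem.Int.mod_lt n (by norm_num)⟩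
  rw [pvAlt_iff, ← pvMid _ hbnd]
  unfold check_sum_divisible_by_10
  rw [pvALoop_iff]
  simp [PySem.Set.empty]
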